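-- pv_equiv track=rewrite | github.com/wangweishi2018431/mathhomework | backend/app/services/ai_service.py | _fix_latex_escapes
-- ===== SOURCE A (Python) =====
-- def _fix_latex_escapes(text: str) -> str:
--     """修复 LaTeX 公式中的反斜杠转义问题。
--
--     将单条反斜杠转换为双反斜杠，但避免重复转义。
--     例如：\\int -> \\\\int，但 \\\\int 保持不变。
--     """
--     result = []
--     i = 0
--     while i < len(text):
--         if text[i] == '\\':
--             # 检查后面是否已经有另一个反斜杠（已经是转义过的）
--             if i + 1 < len(text) and text[i + 1] == '\\':
--                 # 已经是双反斜杠，保持不变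
--                 result.append('\\\\')
--                 i += 2
--             else:
--                 # 单条反斜杠，需要转义为双反斜杠
--                 result.append('\\\\')
--                 i += 1
--         else:
--             result.append(text[i])
--             i += 1
--     return ''.join(result)
-- ===== SOURCE B (Python) =====
-- def _fix_latex_escapes(text: str) -> str:
--     # Run-based scan: each maximal run of backslashes is rounded up to an
--     # even length in one arithmetic step; other characters are copied.
--     out = []
--     i = 0
--     n = len(text)
--     while i < n:
--         c = text[i]
--         if c == '\\':
--             k = i + 1
--             while k < n and text[k] == '\\':
--                 k += 1
--             run = k - i
--             out.append('\\' * (run + run % 2))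
--             i = k
--         else:
--             out.append(c)
--             i += 1
--     return ''.join(out)
-- ===== Notes on version B (the rewrite author's own statement) =====
-- stated objective: alternative
-- what changed: B scans each maximal backslash run as a unit and rounds its length up to even arithmetically ('\'*(run+run%2)), instead of A's character-by-character stepping that pairs backslashes two at a time.
import Mathlib
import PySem

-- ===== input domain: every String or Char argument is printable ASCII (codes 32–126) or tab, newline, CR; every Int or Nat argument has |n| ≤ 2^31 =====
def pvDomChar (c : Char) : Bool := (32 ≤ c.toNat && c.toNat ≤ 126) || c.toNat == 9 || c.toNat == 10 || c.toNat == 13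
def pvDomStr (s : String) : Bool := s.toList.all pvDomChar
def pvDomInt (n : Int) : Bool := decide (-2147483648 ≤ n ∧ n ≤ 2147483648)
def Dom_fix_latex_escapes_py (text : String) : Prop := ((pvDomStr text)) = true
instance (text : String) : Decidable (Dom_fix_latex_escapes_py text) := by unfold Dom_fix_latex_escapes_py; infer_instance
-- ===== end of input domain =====

-- B rounds each maximal backslash run up to an even length in one arithmetic step,
-- instead of A's character-by-character pairing; equivalence is proved for all strings.

-- ===== PORT A =====
-- A's while loop over index i, consuming 1 or 2 chars at a time, as structural
-- recursion over the character list; result list joined at the end.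
def fixA : List Char → List Char
  | [] => []
  | '\\' :: '\\' :: rest' => '\\' :: '\\' :: fixA rest'   -- already escaped pair, keep, i += 2
  | '\\' :: rest => '\\' :: '\\' :: fixA rest               -- lone backslash, double it, i += 1
  | c :: rest => c :: fixA rest

def fix_latex_escapes_py (text : String) : String := String.ofList (fixA text.toList)

-- ===== PORT B =====
-- B's outer loop: copy a non-backslash char, or measure the whole backslash run
-- and emit it rounded up to even length.
def fixB : List Char → List Char
  | c :: rest =>
    if c = '\\' then
      let run := 1 + (rest.takeWhile (· = '\\')).length
      List.replicate (run + run % 2) '\\' ++ fixB (rest.dropWhile (· = '\\'))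
    else c :: fixB rest
  | [] => []
termination_by l => l.length
decreasing_by
  · exact Nat.lt_succ_of_le (List.length_dropWhile_le _ _)
  · simp

def fix_latex_escapes_py_alt (text : String) : String := String.ofList (fixB text.toList)

-- ===== PRECONDITION & SPEC =====
def Spec_fix_latex_escapes_py (text : String) (out : String) : Prop := out = fix_latex_escapes_py_alt text
instance (text : String) (out : String) : Decidable (Spec_fix_latex_escapes_py text out) := by unfold Spec_fix_latex_escapes_py; infer_instance

-- ===== CLAIM (what is proved, stated in full; the proofs are below) =====
def Claim_equal_fix_latex_escapes_py : Prop := ∀ (text : String), Dom_fix_latex_escapes_py text → Spec_fix_latex_escapes_py text (fix_latex_escapes_py text)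

-- ===== LEMMAS AND PROOFS =====

-- A on a maximal backslash run of length k followed by tail: emits k + k % 2 backslashes.
theorem fixA_run (k : Nat) (tail : List Char) (h : tail.head? ≠ some '\\') :
    fixA (List.replicate k '\\' ++ tail) = List.replicate (k + k % 2) '\\' ++ fixA tail := by
  induction k using Nat.strong_induction_on with
  | _ k ih =>
    match k with
    | 0 => simp
    | 1 =>
      cases tail with
      | nil => simp [fixA]
      | cons d t =>
        have hd : d ≠ '\\' := by intro hdd; exact h (by simp [hdd])
        simp [fixA, hd]
    | (k + 2) =>
      have : fixA (List.replicate (k + 2) '\\' ++ tail)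
          = '\\' :: '\\' :: fixA (List.replicate k '\\' ++ tail) := by
        simp [List.replicate_succ, fixA]
      rw [this, ih k (by omega) ]
      have hm : (k + 2) % 2 = k % 2 := by omega
      rw [hm]
      have : k + 2 + k % 2 = ((k + k % 2) + 1) + 1 := by omega
      rw [this]
      simp [List.replicate_succ]

theorem dropWhile_bs_head (l : List Char) :
    (l.dropWhile (· = '\\')).head? ≠ some '\\' := by
  induction l with
  | nil => simp
  | cons d t ih =>
    by_cases hd : d = '\\'
    · simpa [List.dropWhile, hd] using ih
    · simp [List.dropWhile, hd]

-- Main lemma: the two scans agree on every character list.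
theorem fixA_eq_fixB (l : List Char) : fixA l = fixB l := by
  generalize hl : l.length = n
  induction n using Nat.strong_induction_on generalizing l with
  | _ n ih =>
    cases l with
    | nil => simp [fixA, fixB]
    | cons c rest =>
      by_cases hc : c = '\\'
      · subst hc
        -- decompose rest into its leading backslash run and the remainder
        set run := rest.takeWhile (· = '\\') with hrun
        set tail := rest.dropWhile (· = '\\') with htail
        have hsplit : rest = run ++ tail := (List.takeWhile_append_dropWhile).symm
        have hrep : run = List.replicate run.length '\\' := by
          apply List.eq_replicate_of_mem
          intro b hb
          have := List.mem_takeWhile_imp (hrun ▸ hb)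
          simpa using this
        have hhead : tail.head? ≠ some '\\' := htail ▸ dropWhile_bs_head rest
        have hA : fixA ('\\' :: rest) = List.replicate ((run.length + 1) + (run.length + 1) % 2) '\\' ++ fixA tail := by
          have : ('\\' :: rest) = List.replicate (run.length + 1) '\\' ++ tail := by
            rw [List.replicate_succ]
            simp [hsplit, ← hrep]
          rw [this, fixA_run _ _ hhead]
        have hB : fixB ('\\' :: rest) = List.replicate ((1 + run.length) + (1 + run.length) % 2) '\\' ++ fixB tail := by
          rw [hrun, htail]
          simp [fixB]
        rw [hA, hB]
        have htl : tail.length < n := by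
          have h1 : tail.length ≤ rest.length := htail ▸ List.length_dropWhile_le _ _
          have h2 : rest.length < n := by simp at hl; omega
          omega
        rw [ih tail.length htl tail rfl]
        have : run.length + 1 = 1 + run.length := by omega
        rw [this]
      · have hA : fixA (c :: rest) = c :: fixA rest := by simp [fixA, hc]
        have hB : fixB (c :: rest) = c :: fixB rest := by
          simp only [fixB, if_neg hc]
        rw [hA, hB, ih rest.length (by simp at hl; omega) rest rfl]

-- ===== VERDICT (by name: the statement is the Claim_ definition above) =====
theorem fix_latex_escapes_py_spec : Claim_equal_fix_latex_escapes_py := by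
  intro text _
  unfold Spec_fix_latex_escapes_py fix_latex_escapes_py fix_latex_escapes_py_alt
  rw [fixA_eq_fixB]
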